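-- pv_equiv track=rewrite | github.com/Arsen1302/Code-copy-detector | TestData/solutions/problem_1604_3.py | solution_1604_3
-- ===== SOURCE A (Python) =====
-- from typing import List
--
-- def solution_1604_3(nums1: List[int], nums2: List[int]) -> int:
--     diff = [0]*len(nums1)
--     s1,s2=0,0
--     for i in range(len(nums1)):
--         diff[i] = nums1[i]-nums2[i]
--         s1+=nums1[i]
--         s2+=nums2[i]
--     mneg,mpos,neg,pos = 0,0,0,0
--     for i in range(len(nums1)):
--         neg+=diff[i]
--         pos+=diff[i]
--         if neg>0:
--             neg = 0
--         if pos<0: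
--             pos = 0
--         mpos = max(pos,mpos)
--         mneg = min(neg,mneg)
--     return max(s1-mneg,s2+mpos)
-- ===== SOURCE B (Python) =====
-- def solution_1604_3(nums1, nums2):
--     # One pass; prefix-extrema (min/max running prefix of the difference array)
--     # instead of Kadane's reset-on-sign scan over a materialized diff list.
--     s1 = s2 = p = minp = maxp = mpos = mneg = 0
--     for x, y in zip(nums1, nums2):
--         s1 += x
--         s2 += y
--         p += x - y
--         mpos = max(mpos, p - minp)
--         mneg = min(mneg, p - maxp)
--         minp = min(minp, p)
--         maxp = max(maxp, p)
--     return max(s1 - mneg, s2 + mpos)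
-- ===== Notes on version B (the rewrite author's own statement) =====
-- stated objective: alternative
-- what changed: Single fused pass over zip(nums1,nums2) maintaining min/max prefix sums of the difference array (mpos/mneg as prefix-extrema gaps) instead of A's two loops: one building a diff list plus sums, then a Kadane reset-on-sign scan over it.
import Mathlib
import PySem

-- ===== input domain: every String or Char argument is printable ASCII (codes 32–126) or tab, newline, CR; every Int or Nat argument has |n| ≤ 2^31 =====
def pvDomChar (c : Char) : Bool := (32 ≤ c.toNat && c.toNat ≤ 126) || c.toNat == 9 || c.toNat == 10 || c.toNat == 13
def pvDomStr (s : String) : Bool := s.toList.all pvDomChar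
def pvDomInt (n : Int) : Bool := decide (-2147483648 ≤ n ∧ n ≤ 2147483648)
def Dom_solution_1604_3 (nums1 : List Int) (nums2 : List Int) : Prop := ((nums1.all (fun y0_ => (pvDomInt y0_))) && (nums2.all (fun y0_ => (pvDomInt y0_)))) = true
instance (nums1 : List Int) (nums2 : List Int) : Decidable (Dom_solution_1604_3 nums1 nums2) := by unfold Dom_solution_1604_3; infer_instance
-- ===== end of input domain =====

-- B fuses A's two loops into one pass over the zipped lists, maintaining min/max
-- prefix sums of the difference array instead of Kadane's reset-on-sign scan (objective: alternative).

-- ===== PORT A =====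
-- (the Python fills diff[i] in index order; the port builds diff by appending the i-th entry in the same order)
def solution_1604_3 (nums1 : List Int) (nums2 : List Int) : Int :=
  let n : Int := PySem.List.len nums1
  let st1 := (PySem.List.pyRange 0 n).foldl
    (fun (st : List Int × Int × Int) i =>
      (st.1 ++ [PySem.List.pyGetD nums1 i 0 - PySem.List.pyGetD nums2 i 0],
       st.2.1 + PySem.List.pyGetD nums1 i 0,
       st.2.2 + PySem.List.pyGetD nums2 i 0))
    ([], 0, 0)
  let diff := st1.1
  let s1 := st1.2.1
  let s2 := st1.2.2
  let st2 := (PySem.List.pyRange 0 n).foldl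
    (fun (st : Int × Int × Int × Int) i =>
      let neg := st.2.2.1 + PySem.List.pyGetD diff i 0
      let pos := st.2.2.2 + PySem.List.pyGetD diff i 0
      let neg := if neg > 0 then 0 else neg
      let pos := if pos < 0 then 0 else pos
      (min neg st.1, max pos st.2.1, neg, pos))
    (0, 0, 0, 0)
  max (s1 - st2.1) (s2 + st2.2.1)

-- ===== PORT B =====
-- state: (s1, s2, p, minp, maxp, mpos, mneg)
def solution_1604_3_alt (nums1 : List Int) (nums2 : List Int) : Int :=
  let st := (nums1.zip nums2).foldl
    (fun (st : Int × Int × Int × Int × Int × Int × Int) xy =>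
      let s1 := st.1 + xy.1
      let s2 := st.2.1 + xy.2
      let p := st.2.2.1 + (xy.1 - xy.2)
      let mpos := max st.2.2.2.2.2.1 (p - st.2.2.2.1)
      let mneg := min st.2.2.2.2.2.2 (p - st.2.2.2.2.1)
      (s1, s2, p, min st.2.2.2.1 p, max st.2.2.2.2.1 p, mpos, mneg))
    (0, 0, 0, 0, 0, 0, 0)
  max (st.1 - st.2.2.2.2.2.2) (st.2.1 + st.2.2.2.2.2.1)

-- ===== PRECONDITION & SPEC =====
-- Pre_ excludes exactly the inputs where A raises IndexError (nums2 shorter than nums1).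
def Pre_solution_1604_3 (nums1 : List Int) (nums2 : List Int) : Prop :=
  nums1.length ≤ nums2.length
instance (nums1 : List Int) (nums2 : List Int) : Decidable (Pre_solution_1604_3 nums1 nums2) := by
  unfold Pre_solution_1604_3; infer_instance
def pvWitness_solution_1604_3 : List Int × List Int := ([1, -2, 3], [0, 4, -1])

def Spec_solution_1604_3 (nums1 : List Int) (nums2 : List Int) (out : Int) : Prop := out = solution_1604_3_alt nums1 nums2
instance (nums1 : List Int) (nums2 : List Int) (out : Int) : Decidable (Spec_solution_1604_3 nums1 nums2 out) := by unfold Spec_solution_1604_3; infer_instance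

-- ===== CLAIM (what is proved, stated in full; the proofs are below) =====
def Claim_equal_solution_1604_3 : Prop := ∀ (nums1 : List Int) (nums2 : List Int), Dom_solution_1604_3 nums1 nums2 → Pre_solution_1604_3 nums1 nums2 → Spec_solution_1604_3 nums1 nums2 (solution_1604_3 nums1 nums2)

-- ===== LEMMAS AND PROOFS =====

-- A fold over range(len xs) reading xs[i] and ys[i] is a fold over the zipped list (when ys is long enough).
theorem fold_range_two {σ : Type} (xs ys : List Int) (h : xs.length ≤ ys.length)
    (F : σ → Int → Int → σ) (init : σ) :
    (PySem.List.pyRange 0 (PySem.List.len xs)).foldl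
      (fun st i => F st (PySem.List.pyGetD xs i 0) (PySem.List.pyGetD ys i 0)) init
    = (xs.zip ys).foldl (fun st p => F st p.1 p.2) init := by
  have hlen : (xs.zip ys).length = xs.length := by
    simp [List.length_zip]; omega
  have hb : PySem.List.len xs = PySem.List.len (xs.zip ys) := by
    simp [hlen]
  rw [hb]
  rw [PySem.List.foldl_congr_mem _
      (fun st i => F st (PySem.List.pyGetD xs i 0) (PySem.List.pyGetD ys i 0))
      (fun st i => (fun (st : σ) (p : Int × Int) => F st p.1 p.2) st (PySem.List.pyGetD (xs.zip ys) i (0, 0)))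
      init ?_]
  · exact PySem.List.foldl_pyRange_zero_pyGetD (xs.zip ys) (0, 0) (fun st p => F st p.1 p.2) init
  · intro acc i hi
    have hi' := PySem.List.mem_pyRange_one.mp hi
    have h0 : (0 : Int) ≤ i := hi'.1
    have h1 : i < ((xs.zip ys).length : Int) := by
      have := hi'.2; simpa using this
    have h1x : i < (xs.length : Int) := by omega
    have h1y : i < (ys.length : Int) := by omega
    have hz := PySem.List.pyGetD_eq_getElem (xs.zip ys) (i := i) (0, 0) h0 h1
    have hx := PySem.List.pyGetD_eq_getElem xs (i := i) 0 h0 h1x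
    have hy := PySem.List.pyGetD_eq_getElem ys (i := i) 0 h0 h1y
    simp only [hz, hx, hy, List.getElem_zip]

-- Characterization of A's first loop: diff list, s1, s2.
theorem loop1_char (ws : List (Int × Int)) (acc : List Int) (s1 s2 : Int) :
    ws.foldl (fun (st : List Int × Int × Int) p =>
        (st.1 ++ [p.1 - p.2], st.2.1 + p.1, st.2.2 + p.2)) (acc, s1, s2)
    = (acc ++ ws.map (fun p => p.1 - p.2),
       s1 + (ws.map Prod.fst).sum, s2 + (ws.map Prod.snd).sum) := by
  induction ws generalizing acc s1 s2 with
  | nil => simp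
  | cons q t ih =>
    simp only [List.foldl_cons, List.map_cons, List.sum_cons, ih]
    simp
    constructor
    · ring
    · ring

-- Core invariant: Kadane's reset scan over the diff values agrees with the prefix-extrema scan.
theorem kadane_prefix (ws : List (Int × Int))
    (s1 s2 p minp maxp mpos mneg neg pos : Int)
    (hpos : pos = p - minp) (hneg : neg = p - maxp)
    (hminp : minp ≤ p) (hmaxp : p ≤ maxp)
    (hmp0 : 0 ≤ mpos) (hmn0 : mneg ≤ 0) :
    (let A := (ws.map (fun q => q.1 - q.2)).foldl
        (fun (st : Int × Int × Int × Int) d =>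
          let neg := st.2.2.1 + d
          let pos := st.2.2.2 + d
          let neg := if neg > 0 then 0 else neg
          let pos := if pos < 0 then 0 else pos
          (min neg st.1, max pos st.2.1, neg, pos)) (mneg, mpos, neg, pos);
     let B := ws.foldl
        (fun (st : Int × Int × Int × Int × Int × Int × Int) xy =>
          let s1 := st.1 + xy.1
          let s2 := st.2.1 + xy.2
          let p := st.2.2.1 + (xy.1 - xy.2)
          let mpos := max st.2.2.2.2.2.1 (p - st.2.2.2.1)
          let mneg := min st.2.2.2.2.2.2 (p - st.2.2.2.2.1)
          (s1, s2, p, min st.2.2.2.1 p, max st.2.2.2.2.1 p, mpos, mneg))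
        (s1, s2, p, minp, maxp, mpos, mneg);
     A.1 = B.2.2.2.2.2.2 ∧ A.2.1 = B.2.2.2.2.2.1
       ∧ B.1 = s1 + (ws.map Prod.fst).sum ∧ B.2.1 = s2 + (ws.map Prod.snd).sum) := by
  induction ws generalizing s1 s2 p minp maxp mpos mneg neg pos with
  | nil => simp
  | cons q t ih =>
    simp only [List.map_cons, List.foldl_cons, List.sum_cons]
    have h := ih (s1 + q.1) (s2 + q.2) (p + (q.1 - q.2))
      (min minp (p + (q.1 - q.2))) (max maxp (p + (q.1 - q.2)))
      (max mpos (p + (q.1 - q.2) - minp)) (min mneg (p + (q.1 - q.2) - maxp))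
      (if neg + (q.1 - q.2) > 0 then 0 else neg + (q.1 - q.2))
      (if pos + (q.1 - q.2) < 0 then 0 else pos + (q.1 - q.2))
      (by split_ifs with hc <;> omega) (by split_ifs with hc <;> omega)
      (by omega) (by omega) (by omega) (by omega)
    have hmp : min (if neg + (q.1 - q.2) > 0 then 0 else neg + (q.1 - q.2)) mneg
        = min mneg (p + (q.1 - q.2) - maxp) := by split_ifs with hc <;> omega
    have hmx : max (if pos + (q.1 - q.2) < 0 then 0 else pos + (q.1 - q.2)) mpos
        = max mpos (p + (q.1 - q.2) - minp) := by split_ifs with hc <;> omega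
    simp only [hmp, hmx] at *
    refine ⟨h.1, h.2.1, by rw [h.2.2.1]; ring, by rw [h.2.2.2]; ring⟩

-- ===== VERDICT (by name: the statement is the Claim_ definition above) =====
theorem solution_1604_3_spec : Claim_equal_solution_1604_3 := by
  intro nums1 nums2 _ hpre
  unfold Spec_solution_1604_3
  unfold Pre_solution_1604_3 at hpre
  unfold solution_1604_3 solution_1604_3_alt
  simp only []
  rw [fold_range_two nums1 nums2 hpre
      (fun (st : List Int × Int × Int) x y => (st.1 ++ [x - y], st.2.1 + x, st.2.2 + y)) ([], 0, 0)]
  rw [loop1_char]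
  set ws := nums1.zip nums2 with hws
  have hlen : ws.length = nums1.length := by
    simp [hws, List.length_zip]; omega
  have hdiff : PySem.List.len nums1 = PySem.List.len (([] : List Int) ++ ws.map (fun p => p.1 - p.2)) := by
    simp [hlen]
  rw [hdiff]
  rw [PySem.List.foldl_pyRange_zero_pyGetD (([] : List Int) ++ ws.map (fun p => p.1 - p.2)) 0
      (fun (st : Int × Int × Int × Int) d =>
        let neg := st.2.2.1 + d
        let pos := st.2.2.2 + d
        let neg := if neg > 0 then 0 else neg
        let pos := if pos < 0 then 0 else pos
        (min neg st.1, max pos st.2.1, neg, pos)) (0, 0, 0, 0)]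
  have h := kadane_prefix ws 0 0 0 0 0 0 0 0 0
    (by omega) (by omega) (by omega) (by omega) (by omega) (by omega)
  simp only [List.nil_append] at *
  obtain ⟨h1, h2, h3, h4⟩ := h
  rw [h1, h2, h3, h4]
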